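-- pv_equiv track=rewrite | github.com/wakawaka121/Spring---2020 | Short PA 3/one_big_string.py | add_top_bottom_element
-- ===== SOURCE A (Python) =====
-- def add_top_bottom_element(width, j):
--     """
--     This function takes two parameters to
--     generate the top and bottoms of
--     the grid.
--     width: is an int value that determines how
--     long the "string" between the new lines
--     caracter is.
--     j: is an int value that determines top or bottom
--     """
--     string = " "
--     if j == 0:
--         for i in range(width-1):
--                 if i < width-2:
--                     string += "T"
--                 else:
--                     string += " \n"
--     else:
--         for i in range(width-1):
--             if i < width-2:
--                 string += "B"
--             else:
--                 string += " \n"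
--     return string
-- ===== SOURCE B (Python) =====
-- def add_top_bottom_element(width, j):
--     if width < 2:
--         return " "
--     char = "T" if j == 0 else "B"
--     return " " + char * (width - 2) + " \n"
-- ===== Notes on version B (the rewrite author's own statement) =====
-- stated objective: simpler
-- what changed: Replaces A's two duplicated per-character appending loops by selecting the fill character once and building the row in one closed-form expression with string multiplication.
import Mathlib
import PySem

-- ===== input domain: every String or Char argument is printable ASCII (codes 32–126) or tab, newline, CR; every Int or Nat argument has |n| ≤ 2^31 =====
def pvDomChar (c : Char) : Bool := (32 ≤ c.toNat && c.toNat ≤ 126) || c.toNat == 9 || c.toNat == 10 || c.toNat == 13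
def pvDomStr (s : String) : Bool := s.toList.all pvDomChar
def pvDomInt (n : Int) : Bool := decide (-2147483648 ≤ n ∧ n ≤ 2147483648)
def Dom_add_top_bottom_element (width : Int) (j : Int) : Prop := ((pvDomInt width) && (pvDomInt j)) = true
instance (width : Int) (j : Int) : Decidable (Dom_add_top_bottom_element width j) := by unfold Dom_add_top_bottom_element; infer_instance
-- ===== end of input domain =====

-- B builds the row in closed form (one fill character chosen once, then replicated), replacing A's two duplicated per-character loops.

-- ===== PORT A =====
-- string concatenation ported on List Char (Lean's own String.append is kernel-opaque); String.ofList at the end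
def add_top_bottom_element (width : Int) (j : Int) : String :=
  let string : List Char := [' ']
  let string :=
    if j = 0 then
      (PySem.List.pyRange 0 (width - 1) 1).foldl
        (fun s i => if i < width - 2 then s ++ ['T'] else s ++ [' ', '\n']) string
    else
      (PySem.List.pyRange 0 (width - 1) 1).foldl
        (fun s i => if i < width - 2 then s ++ ['B'] else s ++ [' ', '\n']) string
  String.ofList string

-- ===== PORT B =====
def add_top_bottom_element_alt (width : Int) (j : Int) : String :=
  if width < 2 then " "
  else
    let char : Char := if j = 0 then 'T' else 'B'
    String.ofList (' ' :: (List.replicate (width - 2).toNat char ++ [' ', '\n']))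

-- ===== PRECONDITION & SPEC =====
def Spec_add_top_bottom_element (width : Int) (j : Int) (out : String) : Prop := out = add_top_bottom_element_alt width j
instance (width : Int) (j : Int) (out : String) : Decidable (Spec_add_top_bottom_element width j out) := by unfold Spec_add_top_bottom_element; infer_instance

-- ===== CLAIM (what is proved, stated in full; the proofs are below) =====
def Claim_equal_add_top_bottom_element : Prop := ∀ (width : Int) (j : Int), Dom_add_top_bottom_element width j → Spec_add_top_bottom_element width j (add_top_bottom_element width j)

-- ===== LEMMAS AND PROOFS =====

-- A's loop body appends one fill character for every index strictly below the bound
lemma foldl_fill (c : Char) (b : Int) (l : List Int) (h : ∀ x ∈ l, x < b) (acc : List Char) :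
    l.foldl (fun s i => if i < b then s ++ [c] else s ++ [' ', '\n']) acc
      = acc ++ List.replicate l.length c := by
  induction l generalizing acc with
  | nil => simp
  | cons x xs ih =>
    have hx : x < b := h x (by simp)
    simp only [List.foldl_cons, if_pos hx, List.length_cons, List.replicate_succ]
    rw [ih (fun y hy => h y (by simp [hy]))]
    simp

-- A's whole loop in closed form: the last iteration appends " \n", the earlier ones the fill character
lemma loop_closed (c : Char) (width : Int) :
    (PySem.List.pyRange 0 (width - 1) 1).foldl
        (fun s i => if i < width - 2 then s ++ [c] else s ++ [' ', '\n']) [' ']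
      = if width < 2 then [' ']
        else ' ' :: (List.replicate (width - 2).toNat c ++ [' ', '\n']) := by
  rw [PySem.List.pyRange_one]
  simp only [zero_add, Int.sub_zero]
  by_cases hw : width < 2
  · rw [show (width - 1).toNat = 0 from by omega]
    simp [hw]
  · rw [show (width - 1).toNat = (width - 2).toNat + 1 from by omega,
        List.range_succ, List.map_append, List.foldl_append]
    have hlast : ¬ (((width - 2).toNat : Int) < width - 2) := by omega
    simp only [List.map_cons, List.map_nil, List.foldl_cons, List.foldl_nil, if_neg hlast]
    rw [foldl_fill c (width - 2) _ (by intro x hx; simp at hx; omega)]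
    simp [hw]

-- ===== VERDICT (by name: the statement is the Claim_ definition above) =====
theorem add_top_bottom_element_spec : Claim_equal_add_top_bottom_element := by
  intro width j _
  unfold Spec_add_top_bottom_element add_top_bottom_element add_top_bottom_element_alt
  by_cases hj : j = 0 <;> simp only [hj, if_true, if_false] <;>
    rw [loop_closed] <;> by_cases hw : width < 2 <;> simp [hw]
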